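-- pv_equiv track=rewrite | github.com/JKHira/sdsl2_coder | references/legacy_tools/gate_c.py | _has_inline_block_comment
-- ===== SOURCE A (Python) =====
-- def _find_outside_strings(
--     line: str, token: str, start: int = 0, stop_at_line_comment: bool = True
-- ) -> int:
--     in_string: str | None = None
--     escaped = False
--     i = start
--     while i < len(line):
--         ch = line[i]
--         if in_string is not None:
--             if escaped:
--                 escaped = False
--             elif ch == "\\":
--                 escaped = True
--             elif ch == in_string:
--                 in_string = None
--             i += 1
--             continue
--         if stop_at_line_comment and ch == "/" and i + 1 < len(line) and line[i + 1] == "/":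
--             break
--         if ch in ('"', "'"):
--             in_string = ch
--             i += 1
--             continue
--         if line.startswith(token, i):
--             return i
--         i += 1
--     return -1
--
-- def _block_comment_start_index(line: str) -> int:
--     return _find_outside_strings(line, "/*", stop_at_line_comment=True)
--
-- def _block_comment_end_index(
--     line: str, start: int = 0, stop_at_line_comment: bool = True
-- ) -> int:
--     return _find_outside_strings(line, "*/", start=start, stop_at_line_comment=stop_at_line_comment)
--
-- def _has_inline_block_comment(line: str) -> bool:
--     start = _block_comment_start_index(line)
--     end = _block_comment_end_index(line, stop_at_line_comment=False)
--     if start == -1 and end == -1: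
--         return False
--     if start != -1:
--         if any(not ch.isspace() for ch in line[:start]):
--             return True
--         if end != -1 and any(not ch.isspace() for ch in line[end + 2 :]):
--             return True
--         return False
--     return line.strip() != "*/"
-- ===== SOURCE B (Python) =====
-- def _has_inline_block_comment(line: str) -> bool:
--     # Staged decomposition: first precompute a per-index "outside any string
--     # literal" mask in one pass, then do three simple first-index searches over
--     # that mask ('//' stop position, '/*' start before the stop, '*/' end),
--     # and apply the same final decision.
--     outside = []
--     in_string = None
--     escaped = False
--     for ch in line:
--         outside.append(in_string is None)
--         if in_string is None:
--             if ch in ('"', "'"):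
--                 in_string = ch
--         elif escaped:
--             escaped = False
--         elif ch == "\\":
--             escaped = True
--         elif ch == in_string:
--             in_string = None
--
--     def first(pred):
--         return next((i for i, ok in enumerate(outside) if ok and pred(i)), -1)
--
--     stop = first(lambda i: line.startswith("//", i))
--     s = first(lambda i: line.startswith("/*", i) and (stop == -1 or i < stop))
--     e = first(lambda i: line.startswith("*/", i))
--     if s >= 0:
--         return any(not c.isspace() for c in line[:s]) or (
--             e >= 0 and any(not c.isspace() for c in line[e + 2:])
--         )
--     if e >= 0:
--         return line.strip() != "*/"
--     return False
-- ===== Notes on version B (the rewrite author's own statement) =====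
-- stated objective: alternative
-- what changed: Replaced A's two independent online scans (each carrying its own in_string/escaped state machine) by a staged approach: one pass precomputes a per-index outside-string mask, then three simple first-index searches over that mask find the '//' stop, the '/*' start before the stop, and the '*/' end, followed by the same final decision.
import Mathlib
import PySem

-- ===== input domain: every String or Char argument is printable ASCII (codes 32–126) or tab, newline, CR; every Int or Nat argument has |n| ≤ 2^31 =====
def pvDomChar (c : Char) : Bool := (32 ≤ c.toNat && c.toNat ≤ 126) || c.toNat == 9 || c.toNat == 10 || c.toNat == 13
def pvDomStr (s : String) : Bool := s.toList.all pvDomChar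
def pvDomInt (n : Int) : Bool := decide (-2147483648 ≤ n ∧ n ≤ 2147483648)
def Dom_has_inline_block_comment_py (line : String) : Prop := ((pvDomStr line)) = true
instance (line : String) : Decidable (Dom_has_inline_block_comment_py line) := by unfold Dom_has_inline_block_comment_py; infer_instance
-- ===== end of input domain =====

-- B replaces A's two independent stateful token scans by a precomputed per-index
-- outside-string mask followed by three first-index searches over it; alternative decomposition, same cost.


-- ===== PORT A =====
-- _find_outside_strings: while-loop over the index, state (in_string, escaped)
def pvFindOutside (cs : List Char) (token : List Char) (stopLC : Bool)
    (i : Nat) (ins : Option Char) (esc : Bool) : Int :=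
  if h : i < cs.length then
    let ch := cs[i]
    match ins with
    | some q =>
      if esc then pvFindOutside cs token stopLC (i+1) (some q) false
      else if ch = '\\' then pvFindOutside cs token stopLC (i+1) (some q) true
      else if ch = q then pvFindOutside cs token stopLC (i+1) none false
      else pvFindOutside cs token stopLC (i+1) (some q) false
    | none =>
      if stopLC = true ∧ ch = '/' ∧ i + 1 < cs.length ∧ cs.getD (i+1) ' ' = '/' then
        -1  -- break: falls through to `return -1`
      else if ch = '"' ∨ ch = '\'' then pvFindOutside cs token stopLC (i+1) (some ch) false
      else if token.isPrefixOf (cs.drop i) then (i : Int)  -- line.startswith(token, i)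
      else pvFindOutside cs token stopLC (i+1) none false
  else -1
termination_by cs.length - i

def has_inline_block_comment_py (line : String) : Bool :=
  let cs := line.toList
  let start := pvFindOutside cs ['/', '*'] true 0 none false    -- _block_comment_start_index
  let e := pvFindOutside cs ['*', '/'] false 0 none false       -- _block_comment_end_index(stop_at_line_comment=False)
  if start = -1 ∧ e = -1 then false
  else if start ≠ -1 then
    if (PySem.List.slice cs none (some start)).any (fun c => !(PySem.Chars.isspace c)) then true
    else if e ≠ -1 ∧ (PySem.List.slice cs (some (e + 2)) none).any (fun c => !(PySem.Chars.isspace c)) then true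
    else false
  else !(decide (PySem.Chars.strip cs = ['*', '/']))            -- line.strip() != "*/"

-- ===== PORT B =====
-- phase 1 of Source B: the per-index "outside any string literal" mask
def pvMask : List Char → Option Char → Bool → List Bool
  | [], _, _ => []
  | c :: rest, none, _ =>
      true :: pvMask rest (if c = '"' ∨ c = '\'' then some c else none) false
  | c :: rest, some q, esc =>
      false ::
        (if esc then pvMask rest (some q) false
         else if c = '\\' then pvMask rest (some q) true
         else if c = q then pvMask rest none false
         else pvMask rest (some q) false)

-- Source B's `first`: first index i (enumerating the mask from offset i0) with mask true and pred i
def pvFirst (p : Nat → Bool) : Nat → List Bool → Int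
  | _, [] => -1
  | i, b :: rest => if b && p i then (i : Int) else pvFirst p (i+1) rest

def has_inline_block_comment_py_alt (line : String) : Bool :=
  let cs := line.toList
  let mask := pvMask cs none false
  let stop := pvFirst (fun i => ['/', '/'].isPrefixOf (cs.drop i)) 0 mask
  let s := pvFirst (fun i => ['/', '*'].isPrefixOf (cs.drop i) && (stop == -1 || decide ((i : Int) < stop))) 0 mask
  let e := pvFirst (fun i => ['*', '/'].isPrefixOf (cs.drop i)) 0 mask
  if 0 ≤ s then
    (PySem.List.slice cs none (some s)).any (fun c => !(PySem.Chars.isspace c)) ||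
      (decide (0 ≤ e) && (PySem.List.slice cs (some (e + 2)) none).any (fun c => !(PySem.Chars.isspace c)))
  else if 0 ≤ e then !(decide (PySem.Chars.strip cs = ['*', '/']))
  else false

-- ===== PRECONDITION & SPEC =====
def Spec_has_inline_block_comment_py (line : String) (out : Bool) : Prop := out = has_inline_block_comment_py_alt line
instance (line : String) (out : Bool) : Decidable (Spec_has_inline_block_comment_py line out) := by unfold Spec_has_inline_block_comment_py; infer_instance

-- ===== CLAIM (what is proved, stated in full; the proofs are below) =====
def Claim_equal_has_inline_block_comment_py : Prop := ∀ (line : String), Dom_has_inline_block_comment_py line → Spec_has_inline_block_comment_py line (has_inline_block_comment_py line)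




-- ===== LEMMAS AND PROOFS =====

-- one-step equations for A's while-loop
lemma pvFindOutside_stop (cs token : List Char) (stopLC : Bool) (i : Nat)
    (h : ¬ i < cs.length) (ins : Option Char) (esc : Bool) :
    pvFindOutside cs token stopLC i ins esc = -1 := by
  rw [pvFindOutside]; simp [h]

lemma pvFindOutside_some (cs token : List Char) (stopLC : Bool) (i : Nat)
    (h : i < cs.length) (q : Char) (esc : Bool) :
    pvFindOutside cs token stopLC i (some q) esc =
      if esc then pvFindOutside cs token stopLC (i+1) (some q) false
      else if cs[i] = '\\' then pvFindOutside cs token stopLC (i+1) (some q) true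
      else if cs[i] = q then pvFindOutside cs token stopLC (i+1) none false
      else pvFindOutside cs token stopLC (i+1) (some q) false := by
  rw [pvFindOutside]; simp only [dif_pos h]

lemma pvFindOutside_none (cs token : List Char) (stopLC : Bool) (i : Nat)
    (h : i < cs.length) (esc : Bool) :
    pvFindOutside cs token stopLC i none esc =
      if stopLC = true ∧ cs[i] = '/' ∧ i + 1 < cs.length ∧ cs.getD (i+1) ' ' = '/' then -1
      else if cs[i] = '"' ∨ cs[i] = '\'' then pvFindOutside cs token stopLC (i+1) (some cs[i]) false
      else if token.isPrefixOf (cs.drop i) then (i : Int)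
      else pvFindOutside cs token stopLC (i+1) none false := by
  rw [pvFindOutside]; simp only [dif_pos h]

lemma pvBeqComm (x y : Char) : (x == y) = decide (y = x) := by
  by_cases e : x = y
  · subst e; simp
  · have e' : ¬ y = x := fun hh => e hh.symm
    simp [e, e']

-- a two-character startswith test, elementwise
lemma pvPrefix2 (cs : List Char) (a b : Char) (i : Nat) (h : i < cs.length) :
    ([a, b].isPrefixOf (cs.drop i)) =
      (decide (cs[i] = a) && decide (i + 1 < cs.length) && decide (cs.getD (i+1) ' ' = b)) := by
  have hdrop : cs.drop i = cs[i] :: cs.drop (i+1) := List.drop_eq_getElem_cons h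
  by_cases h2 : i + 1 < cs.length
  · have hdrop2 : cs.drop (i+1) = cs[i+1] :: cs.drop (i+2) := List.drop_eq_getElem_cons h2
    have hgd : cs.getD (i+1) ' ' = cs[i+1] := List.getD_eq_getElem cs ' ' h2
    rw [hdrop, hdrop2, hgd]
    show ((a == cs[i]) && ((b == cs[i+1]) && true)) = _
    rw [pvBeqComm, pvBeqComm]
    simp [h2]
  · have hnil : cs.drop (i+1) = [] := List.drop_eq_nil_of_le (by omega)
    rw [hdrop, hnil]
    show ((a == cs[i]) && false) = _
    simp [h2]

lemma pvPrefix2_false (cs : List Char) (a b : Char) (i : Nat) (h : i < cs.length)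
    (hne : cs[i] ≠ a) : ([a, b].isPrefixOf (cs.drop i)) = false := by
  rw [pvPrefix2 cs a b i h]; simp [hne]

-- B's search returns -1 or an index ≥ its offset
lemma pvFirst_range (p : Nat → Bool) :
    ∀ (i : Nat) (l : List Bool), pvFirst p i l = -1 ∨ (i : Int) ≤ pvFirst p i l := by
  intro i l
  induction l generalizing i with
  | nil => left; rfl
  | cons b rest ih =>
    rw [pvFirst]
    split_ifs with hb
    · right; omega
    · rcases ih (i+1) with h | h
      · left; exact h
      · right; omega

lemma pvFirst_neg (p : Nat → Bool) :
    ∀ (i : Nat) (l : List Bool), (∀ j, i ≤ j → p j = false) → pvFirst p i l = -1 := by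
  intro i l hp
  induction l generalizing i with
  | nil => rfl
  | cons b rest ih =>
    rw [pvFirst, hp i le_rfl]
    simp only [Bool.and_false, Bool.false_eq_true, if_false]
    exact ih (i+1) (fun j hj => hp j (by omega))

-- A's stop_at_line_comment=False scan = first mask-true index where the token starts
-- (for a token whose first character is not a quote)
lemma pvFindE (cs : List Char) (a b : Char) (ha1 : a ≠ '"') (ha2 : a ≠ '\'') :
    ∀ (i : Nat) (ins : Option Char) (esc : Bool),
      pvFindOutside cs [a, b] false i ins esc =
        pvFirst (fun j => [a, b].isPrefixOf (cs.drop j)) i (pvMask (cs.drop i) ins esc) := by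
  intro i ins esc
  induction hn : cs.length - i using Nat.strong_induction_on generalizing i ins esc with
  | _ n ih =>
    by_cases h : i < cs.length
    · have hdrop : cs.drop i = cs[i] :: cs.drop (i+1) := List.drop_eq_getElem_cons h
      rcases ins with _ | q
      · rw [pvFindOutside_none cs [a, b] false i h esc, if_neg (by simp),
          hdrop, pvMask, pvFirst, ← hdrop]
        simp only [Bool.true_and]
        by_cases hq : cs[i] = '"' ∨ cs[i] = '\''
        · have hpf : ([a, b].isPrefixOf (cs.drop i)) = false :=
            pvPrefix2_false cs a b i h
              (by rcases hq with hq | hq <;> rw [hq] <;> simp [ha1.symm, ha2.symm])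
          rw [if_pos hq, if_pos hq, hpf]
          simp only [Bool.false_eq_true, if_false]
          exact ih (cs.length - (i+1)) (by omega) (i+1) (some cs[i]) false rfl
        · rw [if_neg hq, if_neg hq]
          by_cases hpf : ([a, b].isPrefixOf (cs.drop i)) = true
          · rw [if_pos hpf, if_pos hpf]
          · rw [if_neg hpf, if_neg hpf]
            exact ih (cs.length - (i+1)) (by omega) (i+1) none false rfl
      · rw [pvFindOutside_some cs [a, b] false i h q esc, hdrop, pvMask, pvFirst]
        simp only [Bool.false_and, Bool.false_eq_true, if_false]
        have IH := fun ins' esc' => ih (cs.length - (i+1)) (by omega) (i+1) ins' esc' rfl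
        by_cases h1 : esc = true
        · rw [if_pos h1, if_pos h1]; exact IH _ _
        · by_cases h2 : cs[i] = '\\'
          · rw [if_neg h1, if_neg h1, if_pos h2, if_pos h2]; exact IH _ _
          · by_cases h3 : cs[i] = q
            · rw [if_neg h1, if_neg h1, if_pos h3]
              rw [if_neg h2, if_neg h2, if_pos h3]
              exact IH _ _
            · rw [if_neg h1, if_neg h1, if_neg h2, if_neg h2, if_neg h3, if_neg h3]
              exact IH _ _
    · have hnil : cs.drop i = [] := List.drop_eq_nil_of_le (by omega)
      rw [pvFindOutside_stop cs [a, b] false i h ins esc, hnil]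
      rfl

-- A's stop_at_line_comment=True '/*' scan = first mask-true '/*' index before the first
-- mask-true '//' index
lemma pvFindS (cs : List Char) (STOP : Int) :
    ∀ (i : Nat) (ins : Option Char) (esc : Bool),
      STOP = pvFirst (fun j => ['/', '/'].isPrefixOf (cs.drop j)) i (pvMask (cs.drop i) ins esc) →
      pvFindOutside cs ['/', '*'] true i ins esc =
        pvFirst (fun j => ['/', '*'].isPrefixOf (cs.drop j) && (STOP == -1 || decide ((j : Int) < STOP)))
          i (pvMask (cs.drop i) ins esc) := by
  intro i ins esc hstop
  induction hn : cs.length - i using Nat.strong_induction_on generalizing i ins esc with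
  | _ n ih =>
    by_cases h : i < cs.length
    · have hdrop : cs.drop i = cs[i] :: cs.drop (i+1) := List.drop_eq_getElem_cons h
      rcases ins with _ | q
      · by_cases hC : cs[i] = '/' ∧ i + 1 < cs.length ∧ cs.getD (i+1) ' ' = '/'
        · -- '//' here: A breaks; STOP = i, so the conditioned search finds nothing
          have hslash : (['/', '/'].isPrefixOf (cs.drop i)) = true := by
            rw [pvPrefix2 cs '/' '/' i h, decide_eq_true hC.1, decide_eq_true hC.2.1,
              decide_eq_true hC.2.2]
            rfl
          rw [pvFindOutside_none cs ['/', '*'] true i h esc, if_pos ⟨rfl, hC⟩]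
          have hSTOP : STOP = (i : Int) := by
            rw [hstop, hdrop, pvMask, pvFirst]
            simp [hslash]
          refine Eq.symm (pvFirst_neg _ i _ ?_)
          intro j hj
          have h1 : (STOP == (-1 : Int)) = false := by
            rw [hSTOP]; simp
          have h2 : decide ((j : Int) < STOP) = false := by
            rw [hSTOP]; simp; omega
          rw [h1, h2]; simp
        · have hslash : (['/', '/'].isPrefixOf (cs.drop i)) = false := by
            rw [pvPrefix2 cs '/' '/' i h]
            by_cases e1 : cs[i] = '/'
            · by_cases e2 : i + 1 < cs.length
              · by_cases e3 : cs.getD (i+1) ' ' = '/'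
                · exact absurd ⟨e1, e2, e3⟩ hC
                · rw [decide_eq_false e3]; simp
              · rw [decide_eq_false e2]; simp
            · rw [decide_eq_false e1]; simp
          rw [pvFindOutside_none cs ['/', '*'] true i h esc,
            if_neg (by rintro ⟨_, hc⟩; exact hC hc), hdrop, pvMask, pvFirst, ← hdrop]
          simp only [Bool.true_and]
          by_cases hq : cs[i] = '"' ∨ cs[i] = '\''
          · have hpf : (['/', '*'].isPrefixOf (cs.drop i)) = false :=
              pvPrefix2_false cs '/' '*' i h (by rcases hq with hq | hq <;> rw [hq] <;> decide)
            have hstop' : STOP = pvFirst (fun j => ['/', '/'].isPrefixOf (cs.drop j)) (i+1)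
                (pvMask (cs.drop (i+1)) (some cs[i]) false) := by
              rw [hstop, hdrop, pvMask, pvFirst]
              simp [hslash, hq]
            rw [if_pos hq, if_pos hq, hpf]
            simp only [Bool.false_and, Bool.false_eq_true, if_false]
            exact ih (cs.length - (i+1)) (by omega) (i+1) (some cs[i]) false hstop' rfl
          · have hstop' : STOP = pvFirst (fun j => ['/', '/'].isPrefixOf (cs.drop j)) (i+1)
                (pvMask (cs.drop (i+1)) none false) := by
              rw [hstop, hdrop, pvMask, pvFirst]
              simp [hslash, hq]
            rw [if_neg hq, if_neg hq]
            by_cases hpf : (['/', '*'].isPrefixOf (cs.drop i)) = true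
            · -- found '/*' at i; STOP is -1 or beyond i, so B also returns i
              have hgt : ((STOP == (-1 : Int)) || decide ((i : Int) < STOP)) = true := by
                rcases pvFirst_range (fun j => ['/', '/'].isPrefixOf (cs.drop j)) (i+1)
                    (pvMask (cs.drop (i+1)) none false) with hr | hr
                · rw [hstop'] at *; simp [hr]
                · rw [hstop'] at *; simp; right; omega
              rw [if_pos hpf]
              simp [hpf, hgt]
            · rw [Bool.not_eq_true] at hpf
              rw [if_neg (by simp [hpf]), hpf]
              simp only [Bool.false_and, Bool.false_eq_true, if_false]
              exact ih (cs.length - (i+1)) (by omega) (i+1) none false hstop' rfl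
      · rw [pvFindOutside_some cs ['/', '*'] true i h q esc, hdrop, pvMask, pvFirst]
        simp only [Bool.false_and, Bool.false_eq_true, if_false]
        by_cases h1 : esc = true
        · have hstop' : STOP = pvFirst (fun j => ['/', '/'].isPrefixOf (cs.drop j)) (i+1)
              (pvMask (cs.drop (i+1)) (some q) false) := by
            rw [hstop, hdrop, pvMask, pvFirst]
            simp only [Bool.false_and, Bool.false_eq_true, if_false]
            rw [if_pos h1]
          rw [if_pos h1, if_pos h1]
          exact ih (cs.length - (i+1)) (by omega) (i+1) (some q) false hstop' rfl
        · by_cases h2 : cs[i] = '\\'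
          · have hstop' : STOP = pvFirst (fun j => ['/', '/'].isPrefixOf (cs.drop j)) (i+1)
                (pvMask (cs.drop (i+1)) (some q) true) := by
              rw [hstop, hdrop, pvMask, pvFirst]
              simp only [Bool.false_and, Bool.false_eq_true, if_false]
              rw [if_neg h1, if_pos h2]
            rw [if_neg h1, if_neg h1, if_pos h2, if_pos h2]
            exact ih (cs.length - (i+1)) (by omega) (i+1) (some q) true hstop' rfl
          · by_cases h3 : cs[i] = q
            · have hstop' : STOP = pvFirst (fun j => ['/', '/'].isPrefixOf (cs.drop j)) (i+1)
                  (pvMask (cs.drop (i+1)) none false) := by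
                rw [hstop, hdrop, pvMask, pvFirst]
                simp only [Bool.false_and, Bool.false_eq_true, if_false]
                rw [if_neg h1, if_neg h2, if_pos h3]
              rw [if_neg h1, if_neg h1, if_pos h3]
              rw [if_neg h2, if_neg h2, if_pos h3]
              exact ih (cs.length - (i+1)) (by omega) (i+1) none false hstop' rfl
            · have hstop' : STOP = pvFirst (fun j => ['/', '/'].isPrefixOf (cs.drop j)) (i+1)
                  (pvMask (cs.drop (i+1)) (some q) false) := by
                rw [hstop, hdrop, pvMask, pvFirst]
                simp only [Bool.false_and, Bool.false_eq_true, if_false]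
                rw [if_neg h1, if_neg h2, if_neg h3]
              rw [if_neg h1, if_neg h1, if_neg h2, if_neg h2, if_neg h3, if_neg h3]
              exact ih (cs.length - (i+1)) (by omega) (i+1) (some q) false hstop' rfl
    · have hnil : cs.drop i = [] := List.drop_eq_nil_of_le (by omega)
      rw [pvFindOutside_stop cs ['/', '*'] true i h _ esc, hnil]
      rfl

-- the shared final decision, over abstract flags
lemma pvDecision_eq (S E : Int) (hS : S = -1 ∨ 0 ≤ S) (hE : E = -1 ∨ 0 ≤ E) (b1 b2 b3 : Bool) :
    (if S = -1 ∧ E = -1 then false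
     else if S ≠ -1 then
       if b1 = true then true else if E ≠ -1 ∧ b2 = true then true else false
     else b3) =
    (if 0 ≤ S then b1 || (decide (0 ≤ E) && b2) else if 0 ≤ E then b3 else false) := by
  rcases hS with hS | hS <;> rcases hE with hE | hE
  · simp [hS, hE]
  · have h1 : ¬ E = -1 := by omega
    have h2 : ¬ (0 ≤ S) := by omega
    simp [hS, h1, hE]
  · have h1 : ¬ S = -1 := by omega
    have h2 : ¬ (0 ≤ E) := by omega
    cases b1 <;> simp [h1, hS, hE]
  · have h1 : ¬ S = -1 := by omega
    have h2 : ¬ E = -1 := by omega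
    cases b1 <;> cases b2 <;> simp [h1, h2, hS, hE]

-- ===== VERDICT (by name: the statement is the Claim_ definition above) =====
theorem has_inline_block_comment_py_spec : Claim_equal_has_inline_block_comment_py := by
  intro line _
  unfold Spec_has_inline_block_comment_py
  simp only [has_inline_block_comment_py, has_inline_block_comment_py_alt]
  rw [pvFindE line.toList '*' '/' (by decide) (by decide) 0 none false,
    pvFindS line.toList
      (pvFirst (fun j => ['/', '/'].isPrefixOf (line.toList.drop j)) 0 (pvMask (line.toList.drop 0) none false))
      0 none false rfl]
  simp only [List.drop_zero]
  exact pvDecision_eq _ _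
    (by simpa using pvFirst_range _ 0 (pvMask line.toList none false))
    (by simpa using pvFirst_range _ 0 (pvMask line.toList none false)) _ _ _
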